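-- pv_equiv track=rewrite | github.com/trulshj/everybody_codes | 2024_The_Kingdom_of_Algorithmia/quest_07.py | run_plan_on_track
-- ===== SOURCE A (Python) =====
-- def run_plan_on_track(plan, track, loops=10):
--     power = 10
--     magical_essence = 0
--     current_loop = 0
--     i = 0
--
--     while current_loop < loops:
--         action = plan[1][i % len(plan[1])]
--         track_action = track[(i) % len(track)]
--
--         if track_action == 'S':
--             current_loop += 1
--
--         if track_action == '+':
--             power += 1
--         elif track_action == '-':
--             power -= 1
--         else:
--             match action:
--                 case '+':
--                     power += 1
--                 case '-':
--                     power -= 1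
--
--         magical_essence += power
--         i += 1
--
--     return (plan[0], magical_essence)
-- ===== SOURCE B (Python) =====
-- def run_plan_on_track(plan, track, loops=10):
--     # Pass 1: find n = number of steps until the `loops`-th 'S' is reached.
--     n = 0
--     seen = 0
--     while seen < loops:
--         if track[n % len(track)] == 'S':
--             seen += 1
--         n += 1
--
--     # Pass 2: the power delta of a single step, independent of any running state.
--     def delta(j):
--         t = track[j % len(track)]
--         if t == '+':
--             return 1
--         if t == '-':
--             return -1
--         a = plan[1][j % len(plan[1])]
--         if a == '+':
--             return 1
--         if a == '-':
--             return -1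
--         return 0
--
--     # essence = sum of power over all steps = 10*n + sum_j delta(j)*(n - j)
--     return (plan[0], 10 * n + sum(delta(j) * (n - j) for j in range(n)))
-- ===== Notes on version B (the rewrite author's own statement) =====
-- stated objective: alternative
-- what changed: B replaces the single stateful running-power loop by a length-finding scan (steps until the loops-th 'S') followed by a closed-form weighted aggregation: essence = 10*n + sum of delta(j)*(n-j), where delta(j) is the per-step power change.
import Mathlib
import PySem

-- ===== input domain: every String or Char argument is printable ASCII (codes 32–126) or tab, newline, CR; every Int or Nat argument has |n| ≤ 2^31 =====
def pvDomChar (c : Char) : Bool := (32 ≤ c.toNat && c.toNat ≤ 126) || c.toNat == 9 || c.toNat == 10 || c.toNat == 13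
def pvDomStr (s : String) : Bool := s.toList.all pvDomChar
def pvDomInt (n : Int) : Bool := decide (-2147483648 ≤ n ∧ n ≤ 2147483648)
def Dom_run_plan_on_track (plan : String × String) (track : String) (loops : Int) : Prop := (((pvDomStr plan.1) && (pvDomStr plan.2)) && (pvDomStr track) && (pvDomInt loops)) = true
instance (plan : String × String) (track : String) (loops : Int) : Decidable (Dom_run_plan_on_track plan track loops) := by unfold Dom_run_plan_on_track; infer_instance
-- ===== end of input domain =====

-- B replaces A's single stateful running-power loop by a step-count scan plus a
-- closed-form weighted sum of per-step deltas; return values agree on Pre_.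
-- The fuel argument (loops.toNat * len(track) + 1) is only a totality guard:
-- under Pre_ the loops-th 'S' is reached within that many steps.

-- ===== PORT A =====
-- A's while loop: state (power, essence, current_loop, i), returns magical_essence.
def pvALoop (p2 tr : List Char) (loops : Int) : Nat → Int → Int → Int → Int → Int
  | 0, _, essence, _, _ => essence
  | fuel + 1, power, essence, cur, i =>
    if cur < loops then
      let action := (PySem.List.pyGet? p2 (PySem.Int.mod i (p2.length : Int))).getD ' '
      let ta := (PySem.List.pyGet? tr (PySem.Int.mod i (tr.length : Int))).getD ' '
      let cur' := if ta = 'S' then cur + 1 else cur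
      let power' :=
        if ta = '+' then power + 1
        else if ta = '-' then power - 1
        else if action = '+' then power + 1
        else if action = '-' then power - 1
        else power
      pvALoop p2 tr loops fuel power' (essence + power') cur' (i + 1)
    else essence

def run_plan_on_track (plan : String × String) (track : String) (loops : Int) : String × Int :=
  (plan.1, pvALoop plan.2.toList track.toList loops (loops.toNat * track.toList.length + 1) 10 0 0 0)

-- ===== PORT B =====
-- Pass 1 of Source B: count steps until the loops-th 'S'.
def pvFindN (tr : List Char) (loops : Int) : Nat → Int → Int → Int
  | 0, _, n => n
  | fuel + 1, seen, n =>
    if seen < loops then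
      let seen' := if (PySem.List.pyGet? tr (PySem.Int.mod n (tr.length : Int))).getD ' ' = 'S' then seen + 1 else seen
      pvFindN tr loops fuel seen' (n + 1)
    else n

-- Source B's delta(j): the power change of step j.
def pvDelta (p2 tr : List Char) (j : Int) : Int :=
  let t := (PySem.List.pyGet? tr (PySem.Int.mod j (tr.length : Int))).getD ' '
  if t = '+' then 1
  else if t = '-' then -1
  else
    let a := (PySem.List.pyGet? p2 (PySem.Int.mod j (p2.length : Int))).getD ' '
    if a = '+' then 1
    else if a = '-' then -1
    else 0

def run_plan_on_track_alt (plan : String × String) (track : String) (loops : Int) : String × Int :=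
  let tr := track.toList
  let n := pvFindN tr loops (loops.toNat * tr.length + 1) 0 0
  let s := (PySem.List.pyRange 0 n 1).foldl (fun acc j => acc + pvDelta plan.2.toList tr j * (n - j)) 0
  (plan.1, 10 * n + s)

-- ===== PRECONDITION & SPEC =====
-- Pre_ excludes exactly the inputs on which Python A does not return: loops > 0 with
-- an empty track or empty plan[1] (ZeroDivisionError) or a track without 'S' (infinite loop).
def Pre_run_plan_on_track (plan : String × String) (track : String) (loops : Int) : Prop :=
  loops ≤ 0 ∨ (track ≠ "" ∧ 'S' ∈ track.toList ∧ plan.2 ≠ "")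
instance (plan : String × String) (track : String) (loops : Int) : Decidable (Pre_run_plan_on_track plan track loops) := by unfold Pre_run_plan_on_track; infer_instance

def pvWitness_run_plan_on_track : (String × String) × String × Int := (("A", "+-"), "=S+", 2)

def Spec_run_plan_on_track (plan : String × String) (track : String) (loops : Int) (out : String × Int) : Prop := out = run_plan_on_track_alt plan track loops
instance (plan : String × String) (track : String) (loops : Int) (out : String × Int) : Decidable (Spec_run_plan_on_track plan track loops out) := by unfold Spec_run_plan_on_track; infer_instance

-- ===== CLAIM (what is proved, stated in full; the proofs are below) =====
def Claim_equal_run_plan_on_track : Prop := ∀ (plan : String × String) (track : String) (loops : Int), Dom_run_plan_on_track plan track loops → Pre_run_plan_on_track plan track loops → Spec_run_plan_on_track plan track loops (run_plan_on_track plan track loops)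

-- ===== LEMMAS AND PROOFS =====

-- Additive folds peel off their initial value.
theorem pvFoldAdd (g : Int → Int) (l : List Int) : ∀ (x : Int),
    l.foldl (fun acc j => acc + g j) x = x + l.foldl (fun acc j => acc + g j) 0 := by
  induction l with
  | nil => intro x; simp
  | cons a l ih => intro x; simp only [List.foldl_cons]; rw [ih, ih (0 + g a)]; ring

-- pvFindN never returns less than its starting step counter.
theorem pvFindN_ge (tr : List Char) (loops : Int) : ∀ (fuel : Nat) (seen n : Int),
    n ≤ pvFindN tr loops fuel seen n := by
  intro fuel
  induction fuel with
  | zero => intro seen n; simp [pvFindN]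
  | succ f ih =>
    intro seen n
    simp only [pvFindN]
    split
    · exact le_trans (by omega) (ih _ (n + 1))
    · exact le_refl n

-- A's per-step power update is power + pvDelta.
theorem pvStepDelta (p2 tr : List Char) (power i : Int) :
    (let action := (PySem.List.pyGet? p2 (PySem.Int.mod i (p2.length : Int))).getD ' '
     let ta := (PySem.List.pyGet? tr (PySem.Int.mod i (tr.length : Int))).getD ' '
     if ta = '+' then power + 1
     else if ta = '-' then power - 1
     else if action = '+' then power + 1
     else if action = '-' then power - 1
     else power) = power + pvDelta p2 tr i := by
  simp only [pvDelta]
  split_ifs <;> ring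

-- Main invariant: A's loop from any state equals the weighted-sum form over the
-- remaining steps, with the end index given by pvFindN on the same fuel.
theorem pvMain (p2 tr : List Char) (loops : Int) : ∀ (fuel : Nat) (power essence cur n : Int),
    pvALoop p2 tr loops fuel power essence cur n
      = essence + power * (pvFindN tr loops fuel cur n - n)
        + (PySem.List.pyRange n (pvFindN tr loops fuel cur n) 1).foldl
            (fun acc j => acc + pvDelta p2 tr j * (pvFindN tr loops fuel cur n - j)) 0 := by
  intro fuel
  induction fuel with
  | zero =>
    intro power essence cur n
    simp [pvALoop, pvFindN, PySem.List.pyRange_one_eq_nil (le_refl n)]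
  | succ f ih =>
    intro power essence cur n
    by_cases h : cur < loops
    · have hN : pvFindN tr loops (f + 1) cur n
          = pvFindN tr loops f
              (if (PySem.List.pyGet? tr (PySem.Int.mod n (tr.length : Int))).getD ' ' = 'S' then cur + 1 else cur)
              (n + 1) := by
        simp only [pvFindN]; rw [if_pos h]
      set cur' := (if (PySem.List.pyGet? tr (PySem.Int.mod n (tr.length : Int))).getD ' ' = 'S' then cur + 1 else cur) with hcur'
      set N := pvFindN tr loops f cur' (n + 1) with hNdef
      have hle : n + 1 ≤ N := pvFindN_ge tr loops f cur' (n + 1)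
      have hALoop : pvALoop p2 tr loops (f + 1) power essence cur n
          = pvALoop p2 tr loops f (power + pvDelta p2 tr n)
              (essence + (power + pvDelta p2 tr n)) cur' (n + 1) := by
        simp only [pvALoop]; rw [if_pos h, pvStepDelta]
      rw [hALoop, ih, hN, ← hNdef]
      rw [PySem.List.pyRange_one_cons (by omega : n < N)]
      simp only [List.foldl_cons]
      rw [pvFoldAdd, pvFoldAdd (fun j => pvDelta p2 tr j * (N - j)) _ (0 + pvDelta p2 tr n * (N - n))]
      ring
    · have hN : pvFindN tr loops (f + 1) cur n = n := by
        simp only [pvFindN]; rw [if_neg h]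
      have hA : pvALoop p2 tr loops (f + 1) power essence cur n = essence := by
        simp only [pvALoop]; rw [if_neg h]
      rw [hA, hN, PySem.List.pyRange_one_eq_nil (le_refl n)]
      simp

-- ===== VERDICT (by name: the statement is the Claim_ definition above) =====
theorem run_plan_on_track_spec : Claim_equal_run_plan_on_track := by
  intro plan track loops _ _
  unfold Spec_run_plan_on_track run_plan_on_track run_plan_on_track_alt
  rw [pvMain]
  simp only [Prod.mk.injEq, true_and]
  ring
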